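-- pv_equiv track=rewrite | github.com/filippocasari/Assignment2NumericalAlg | main.py | create_b_vector
-- ===== SOURCE A (Python) =====
-- def create_b_vector(n):
--     b = []  # empty vector
--     for i in range(n):  # for loop to fill the b vector
--         if i == 0 or i == n - 1:  # if we are at the end of the b vector append just 7
--             b.append(7)
--         elif i == (n / 2) - 1 or i == (n / 2):  # if we are in the middle of the b vector append just 10
--             b.append(10)
--         else:  # otherwise, 9
--             b.append(9)
--     return b  # return this vector
-- ===== SOURCE B (Python) =====
-- def create_b_vector(n):
--     b = [9] * n  # default vector; empty for n <= 0
--     if n > 0: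
--         if n % 2 == 0:  # the middle pair exists only for even n
--             b[n // 2 - 1] = 10
--             b[n // 2] = 10
--         b[0] = 7       # endpoints written last so they win on overlap
--         b[n - 1] = 7
--     return b
-- ===== Notes on version B (the rewrite author's own statement) =====
-- stated objective: faster
-- what changed: B replaces A's per-index loop with three classification branches by a bulk default vector [9]*n followed by at most four direct index overwrites (middle pair only for even n, endpoints written last so they win on overlap).
import Mathlib
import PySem

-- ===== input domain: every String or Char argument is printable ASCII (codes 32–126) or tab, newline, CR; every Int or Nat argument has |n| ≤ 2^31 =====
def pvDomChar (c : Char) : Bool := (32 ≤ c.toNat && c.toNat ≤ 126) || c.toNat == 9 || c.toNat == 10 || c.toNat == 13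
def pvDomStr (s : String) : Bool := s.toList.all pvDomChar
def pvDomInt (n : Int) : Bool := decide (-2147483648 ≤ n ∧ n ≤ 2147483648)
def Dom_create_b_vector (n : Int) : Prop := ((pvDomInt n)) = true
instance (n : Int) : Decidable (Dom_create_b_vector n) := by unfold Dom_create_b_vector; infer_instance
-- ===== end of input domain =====

-- B builds [9]*n once and overwrites at most four entries instead of classifying every index in a loop (objective: simpler).

-- ===== PORT A =====
-- Python compares the int i with the float n / 2; on the domain |n| ≤ 2^31 that
-- float is exact, so 'i == (n / 2) - 1' ↔ 2*i = n - 2 and 'i == n / 2' ↔ 2*i = n.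
def create_b_vector (n : Int) : List Int :=
  (PySem.List.pyRange 0 n 1).foldl
    (fun b i =>
      if i == 0 || i == n - 1 then b ++ [7]
      else if 2 * i == n - 2 || 2 * i == n then b ++ [10]
      else b ++ [9]) []

-- ===== PORT B =====
-- [9] * n → pyRepeat; under the 'n > 0' guard every written index is in range and
-- nonnegative (b[n-1] for the Python b[n - 1]), so List.set with nat indices is exact.
def create_b_vector_alt (n : Int) : List Int :=
  let b := PySem.List.pyRepeat [9] n
  if n > 0 then
    let b := if n % 2 == 0 then (b.set (n.toNat / 2 - 1) 10).set (n.toNat / 2) 10 else b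
    (b.set 0 7).set (n.toNat - 1) 7
  else b

-- ===== PRECONDITION & SPEC =====
def Spec_create_b_vector (n : Int) (out : List Int) : Prop := out = create_b_vector_alt n
instance (n : Int) (out : List Int) : Decidable (Spec_create_b_vector n out) := by unfold Spec_create_b_vector; infer_instance

-- ===== CLAIM (what is proved, stated in full; the proofs are below) =====
def Claim_equal_create_b_vector : Prop := ∀ (n : Int), Dom_create_b_vector n → Spec_create_b_vector n (create_b_vector n)

-- ===== LEMMAS AND PROOFS =====

-- A written as a map over the index range
theorem create_b_vector_eq_map (n : Int) :
    create_b_vector n = (List.range n.toNat).map (fun (k : Nat) =>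
      if ((k : Int) = 0 ∨ (k : Int) = n - 1) then (7 : Int)
      else if (2 * (k : Int) = n - 2 ∨ 2 * (k : Int) = n) then 10 else 9) := by
  unfold create_b_vector
  have hfun : (fun (b : List Int) (i : Int) =>
      if i == 0 || i == n - 1 then b ++ [7]
      else if 2 * i == n - 2 || 2 * i == n then b ++ [10]
      else b ++ [9])
      = (fun (b : List Int) (i : Int) => b ++
        [if (i = 0 ∨ i = n - 1) then (7 : Int)
         else if (2 * i = n - 2 ∨ 2 * i = n) then 10 else 9]) := by
    funext b i
    by_cases h1 : i = 0 ∨ i = n - 1 <;> by_cases h2 : 2 * i = n - 2 ∨ 2 * i = n <;>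
      simp [h1, h2]
  rw [hfun, PySem.List.foldl_append_singleton_eq_map, PySem.List.pyRange_one]
  rw [List.map_map]
  simp only [List.nil_append, Function.comp_def, zero_add, sub_zero]

theorem create_b_vector_length (n : Int) :
    (create_b_vector_alt n).length = n.toNat := by
  unfold create_b_vector_alt
  by_cases hn : (0:Int) < n
  · by_cases he : ((n % 2 == 0) = true) <;>
      simp [hn, he, PySem.List.pyRepeat_singleton]
  · simp [hn, PySem.List.pyRepeat_singleton]

-- ===== VERDICT (by name: the statement is the Claim_ definition above) =====
theorem create_b_vector_spec : Claim_equal_create_b_vector := by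
  intro n _
  unfold Spec_create_b_vector
  rw [create_b_vector_eq_map]
  apply List.ext_getElem
  · simp [create_b_vector_length]
  · intro k hk hk'
    have hkn : k < n.toNat := by simpa using hk
    simp only [List.getElem_map, List.getElem_range]
    unfold create_b_vector_alt
    have hn : (0:Int) < n := by omega
    by_cases he : ((n % 2 : Int) = 0)
    · simp only [hn, if_pos, he, beq_self_eq_true,
        PySem.List.pyRepeat_singleton, List.getElem_set, List.getElem_replicate]
      split_ifs <;> omega
    · have he' : ¬ ((n % 2 == 0) = true) := by simpa using he
      simp only [hn, if_pos, if_neg he',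
        PySem.List.pyRepeat_singleton, List.getElem_set, List.getElem_replicate]
      split_ifs <;> omega
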